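-- pv_equiv track=rewrite | github.com/MikelBarajas38/Reply2022-coding-challenge-CTF | 200.py | generate_portal_grid
-- ===== SOURCE A (Python) =====
-- def generate_portal_grid(grid):
--
--     n = len(grid)
--     m = len(grid[0])
--
--     portal_grid = [[(-1, -1) for _ in range(m)] for _ in range(n)]
--
--     portal_matcher = {}
--
--     for i in range(n):
--         for j in range(m):
--
--             if not grid[i][j].islower():
--                 continue
--
--             p = grid[i][j]
--
--             if p not in portal_matcher:
--                 portal_matcher[p] = (i, j)
--             else:
--                 pi, pj = portal_matcher[p]
--                 portal_grid[i][j] = (pi, pj)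
--                 portal_grid[pi][pj] = (i, j)
--
--     return portal_grid
-- ===== SOURCE B (Python) =====
-- def generate_portal_grid(grid):
--     n = len(grid)
--     m = len(grid[0])
--
--     occ = {}
--     for i in range(n):
--         for j in range(m):
--             p = grid[i][j]
--             if p.islower():
--                 occ.setdefault(p, []).append((i, j))
--
--     def link(i, j):
--         p = grid[i][j]
--         if not p.islower():
--             return (-1, -1)
--         lst = occ[p]
--         if len(lst) < 2:
--             return (-1, -1)
--         return lst[-1] if lst[0] == (i, j) else lst[0]
--
--     return [[link(i, j) for j in range(m)] for i in range(n)]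
-- ===== Notes on version B (the rewrite author's own statement) =====
-- stated objective: alternative
-- what changed: A makes one stateful pass, keeping a dict of pending anchors and overwriting the output grid in place; B first collects each lowercase character's row-major occurrence list into a dict and then builds the grid by a pointwise closed form (first occurrence links to the last, every later one links to the first), with no mutation of the output.
import Mathlib
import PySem

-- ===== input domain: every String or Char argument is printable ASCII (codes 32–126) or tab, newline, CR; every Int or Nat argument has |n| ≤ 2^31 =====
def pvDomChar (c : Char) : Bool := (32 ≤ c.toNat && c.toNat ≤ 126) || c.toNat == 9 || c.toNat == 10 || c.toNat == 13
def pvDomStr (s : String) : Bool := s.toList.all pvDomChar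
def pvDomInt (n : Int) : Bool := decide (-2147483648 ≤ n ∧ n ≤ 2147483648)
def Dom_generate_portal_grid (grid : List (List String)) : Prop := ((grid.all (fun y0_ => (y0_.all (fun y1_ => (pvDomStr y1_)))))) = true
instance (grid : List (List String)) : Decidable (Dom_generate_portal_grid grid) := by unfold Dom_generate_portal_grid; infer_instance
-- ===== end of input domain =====

-- B replaces A's stateful single pass (dict of pending anchors + in-place overwrites of the
-- output grid) by a pointwise closed form: each cell's link is computed directly from the
-- row-major list of occurrences of its character (objective: alternative decomposition).

-- ===== PORT A =====
-- str.islower(), ported by hand (exact on the ASCII domain: some lowercase letter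
-- present and no uppercase letter).
def pyStrIslower (s : String) : Bool :=
  s.toList.any (fun c => PySem.Chars.islower c) && !(s.toList.any (fun c => PySem.Chars.isupper c))

-- grid[i][j] (both ports only evaluate it at in-range indices under Pre_)
def pvCellAt (grid : List (List String)) (c : Nat × Nat) : String :=
  (grid.getD c.1 []).getD c.2 ""

-- portal_grid[i][j] = v
def pvSet2 (pg : List (List (Int × Int))) (i j : Nat) (v : Int × Int) : List (List (Int × Int)) :=
  pg.set i ((pg.getD i []).set j v)

-- one iteration of A's inner loop body (state = (portal_grid, portal_matcher))
def pvStepA (grid : List (List String))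
    (st : List (List (Int × Int)) × PySem.Dict String (Nat × Nat)) (c : Nat × Nat) :
    List (List (Int × Int)) × PySem.Dict String (Nat × Nat) :=
  let p := pvCellAt grid c
  if pyStrIslower p then
    match st.2.get? p with
    | none => (st.1, st.2.insert p c)
    | some a => (pvSet2 (pvSet2 st.1 c.1 c.2 ((a.1 : Int), (a.2 : Int))) a.1 a.2 ((c.1 : Int), (c.2 : Int)), st.2)
  else st

def generate_portal_grid (grid : List (List String)) : List (List (Int × Int)) :=
  let n := grid.length
  let m := (grid.headD []).length
  let init : List (List (Int × Int)) := List.replicate n (List.replicate m ((-1 : Int), (-1 : Int)))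
  ((List.range n).foldl
    (fun st i => (List.range m).foldl (fun st j => pvStepA grid st (i, j)) st)
    (init, PySem.Dict.empty)).1

-- ===== PORT B =====
def generate_portal_grid_alt (grid : List (List String)) : List (List (Int × Int)) :=
  let n := grid.length
  let m := (grid.headD []).length
  let occ : PySem.Dict String (List (Nat × Nat)) :=
    (List.range n).foldl
      (fun d i => (List.range m).foldl
        (fun d j =>
          let p := pvCellAt grid (i, j)
          if pyStrIslower p then d.modify p [] (· ++ [(i, j)]) else d) d)
      PySem.Dict.empty
  (List.range n).map (fun i => (List.range m).map (fun j =>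
    let p := pvCellAt grid (i, j)
    if pyStrIslower p then
      let lst := occ.getD p []
      if lst.length < 2 then ((-1 : Int), (-1 : Int))
      else if lst.headD (0, 0) = (i, j) then
        (((lst.getLastD (0, 0)).1 : Int), ((lst.getLastD (0, 0)).2 : Int))
      else (((lst.headD (0, 0)).1 : Int), ((lst.headD (0, 0)).2 : Int))
    else ((-1 : Int), (-1 : Int))))

-- ===== PRECONDITION & SPEC =====
-- Pre_ excludes exactly the inputs on which Python A raises: the empty grid
-- (grid[0] is an IndexError) and grids with a row shorter than the first row
-- (grid[i][j] is an IndexError).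
def Pre_generate_portal_grid (grid : List (List String)) : Prop :=
  grid ≠ [] ∧ ∀ row ∈ grid, (grid.headD []).length ≤ row.length

instance (grid : List (List String)) : Decidable (Pre_generate_portal_grid grid) := by
  unfold Pre_generate_portal_grid; infer_instance

def pvWitness_generate_portal_grid : List (List String) := [["a", "b"], ["b", "a"]]

def Spec_generate_portal_grid (grid : List (List String)) (out : List (List (Int × Int))) : Prop :=
  out = generate_portal_grid_alt grid
instance (grid : List (List String)) (out : List (List (Int × Int))) : Decidable (Spec_generate_portal_grid grid out) := by
  unfold Spec_generate_portal_grid; infer_instance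

-- ===== CLAIM (what is proved, stated in full; the proofs are below) =====
def Claim_equal_generate_portal_grid : Prop := ∀ (grid : List (List String)), Dom_generate_portal_grid grid → Pre_generate_portal_grid grid → Spec_generate_portal_grid grid (generate_portal_grid grid)

-- ===== LEMMAS AND PROOFS =====

-- the row-major list of all cell coordinates
def pvCells (n m : Nat) : List (Nat × Nat) :=
  (List.range n).flatMap (fun i => (List.range m).map (fun j => (i, j)))

-- the pointwise value of a cell after the cells in `done` have been processed
def pvVal (grid : List (List String)) (done : List (Nat × Nat)) (c : Nat × Nat) : Int × Int :=
  let p := pvCellAt grid c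
  if pyStrIslower p then
    if c ∈ done then
      let occ := done.filter (fun x => pvCellAt grid x == p)
      if occ.length < 2 then ((-1 : Int), (-1 : Int))
      else if occ.headD (0, 0) = c then
        (((occ.getLastD (0, 0)).1 : Int), ((occ.getLastD (0, 0)).2 : Int))
      else (((occ.headD (0, 0)).1 : Int), ((occ.headD (0, 0)).2 : Int))
    else ((-1 : Int), (-1 : Int))
  else ((-1 : Int), (-1 : Int))

def pvMkGrid (grid : List (List String)) (n m : Nat) (done : List (Nat × Nat)) :
    List (List (Int × Int)) :=
  (List.range n).map (fun i => (List.range m).map (fun j => pvVal grid done (i, j)))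

lemma pvMem_cells {n m : Nat} {c : Nat × Nat} :
    c ∈ pvCells n m ↔ c.1 < n ∧ c.2 < m := by
  obtain ⟨i, j⟩ := c
  simp [pvCells, List.mem_flatMap, List.mem_range, List.mem_map]

lemma pvCells_nodup (n m : Nat) : (pvCells n m).Nodup := by
  have : pvCells n m = (List.range n).product (List.range m) := rfl
  rw [this]
  exact List.Nodup.product (List.nodup_range) (List.nodup_range)

lemma pvFoldl_flatMap {α β σ : Type} (l : List α) (f : α → List β) (g : σ → β → σ) (s : σ) :
    (l.flatMap f).foldl g s = l.foldl (fun s a => (f a).foldl g s) s := by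
  induction l generalizing s with
  | nil => rfl
  | cons a l ih => simp [List.flatMap_cons, List.foldl_append, ih]

-- pointwise description of pvSet2 on a grid given as a map over coordinates
lemma pvSet2_mapGrid (f : Nat → Nat → Int × Int) {n m i j : Nat} (hi : i < n) (_hj : j < m)
    (v : Int × Int) :
    pvSet2 ((List.range n).map (fun i' => (List.range m).map (fun j' => f i' j'))) i j v =
      (List.range n).map (fun i' => (List.range m).map (fun j' =>
        if i' = i ∧ j' = j then v else f i' j')) := by
  unfold pvSet2
  have hrow : ((List.range n).map (fun i' => (List.range m).map (fun j' => f i' j'))).getD i []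
      = (List.range m).map (fun j' => f i j') := by
    simp [List.getD, hi]
  rw [hrow]
  apply List.ext_getElem
  · simp
  · intro i' h1 h2
    simp only [List.getElem_set, List.getElem_map, List.getElem_range]
    by_cases h : i = i'
    · subst h
      apply List.ext_getElem
      · simp
      · intro j' h3 h4
        simp only [List.getElem_map, List.getElem_range]
        by_cases hjj : j = j'
        · subst hjj; simp
        · simp [hjj, Ne.symm hjj]
    · simp only [if_neg h]
      apply List.ext_getElem
      · simp
      · intro j' h3 h4
        simp only [List.getElem_map, List.getElem_range]
        have : ¬ (i' = i ∧ j' = j) := fun ⟨h', _⟩ => h h'.symm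
        simp [this]

lemma pvMkGrid_eq_map (grid : List (List String)) (n m : Nat) (done : List (Nat × Nat)) :
    pvMkGrid grid n m done =
      (List.range n).map (fun i' => (List.range m).map (fun j' => pvVal grid done (i', j'))) := rfl

lemma pvMkGrid_congr (grid : List (List String)) (n m : Nat) (d1 d2 : List (Nat × Nat))
    (h : ∀ x, pvVal grid d1 x = pvVal grid d2 x) :
    pvMkGrid grid n m d1 = pvMkGrid grid n m d2 := by
  simp only [pvMkGrid, h]

-- appending a non-lowercase cell changes nothing pointwise
lemma pvVal_snoc_skip (grid : List (List String)) (done : List (Nat × Nat)) (c : Nat × Nat)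
    (hp : ¬ pyStrIslower (pvCellAt grid c) = true) (x : Nat × Nat) :
    pvVal grid (done ++ [c]) x = pvVal grid done x := by
  unfold pvVal
  by_cases hq : pyStrIslower (pvCellAt grid x) = true
  · have hxc : x ≠ c := fun h => hp (h ▸ hq)
    have hfc : ¬ (pvCellAt grid c == pvCellAt grid x) = true := by
      intro h; exact hp ((eq_of_beq h) ▸ hq)
    simp only [hq, if_true, List.filter_append, List.filter_cons, List.filter_nil, hfc,
      List.mem_append, List.mem_singleton, hxc, or_false]
    simp
  · simp only [if_neg hq]

-- appending the first occurrence of its character changes nothing pointwise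
lemma pvVal_snoc_insert (grid : List (List String)) (done : List (Nat × Nat)) (c : Nat × Nat)
    (hp : pyStrIslower (pvCellAt grid c) = true) (hcd : c ∉ done)
    (hnone : done.filter (fun x => pvCellAt grid x == pvCellAt grid c) = []) (x : Nat × Nat) :
    pvVal grid (done ++ [c]) x = pvVal grid done x := by
  unfold pvVal
  by_cases hq : pyStrIslower (pvCellAt grid x) = true
  swap
  · simp only [if_neg hq]
  simp only [hq, if_true]
  by_cases hqp : pvCellAt grid x = pvCellAt grid c
  · -- same character as c: x can only be c itself or unprocessed
    have hfx : done.filter (fun y => pvCellAt grid y == pvCellAt grid x) = [] := by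
      rw [hqp, hnone]
    by_cases hxc : x = c
    · subst hxc
      have hmem : x ∈ done ++ [x] := by simp
      simp only [hmem, if_true, hcd, if_false, List.filter_append, hfx, List.nil_append]
      have : (List.filter (fun y => pvCellAt grid y == pvCellAt grid x) [x]) = [x] := by
        simp
      rw [this]
      simp
    · have hxdone : x ∉ done := by
        intro h
        have : x ∈ done.filter (fun y => pvCellAt grid y == pvCellAt grid x) := by
          rw [List.mem_filter]; exact ⟨h, by simp⟩
        rw [hfx] at this; simp at this
      have : x ∉ done ++ [c] := by simp [hxdone, hxc]
      simp only [this, if_false, hxdone]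
  · -- different character: its filter ignores c, membership unchanged
    have hxc : x ≠ c := fun h => hqp (by rw [h])
    have hfc : ¬ (pvCellAt grid c == pvCellAt grid x) = true := by
      intro h; exact hqp (eq_of_beq h).symm
    simp only [List.filter_append, List.mem_append, List.mem_singleton, hxc, or_false]
    simp [hfc]

-- the pointwise effect of linking c to its anchor a
lemma pvVal_snoc_match (grid : List (List String)) (done : List (Nat × Nat)) (c a : Nat × Nat)
    (hp : pyStrIslower (pvCellAt grid c) = true) (hcd : c ∉ done)
    (ha : (done.filter (fun x => pvCellAt grid x == pvCellAt grid c)).head? = some a)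
    (x : Nat × Nat) :
    pvVal grid (done ++ [c]) x =
      if x = a then ((c.1 : Int), (c.2 : Int))
      else if x = c then ((a.1 : Int), (a.2 : Int))
      else pvVal grid done x := by
  set p := pvCellAt grid c with hpdef
  obtain ⟨t, hocc⟩ : ∃ t, done.filter (fun x => pvCellAt grid x == p) = a :: t := by
    cases h : done.filter (fun x => pvCellAt grid x == p) with
    | nil => rw [h] at ha; simp at ha
    | cons b t => rw [h] at ha; simp at ha; exact ⟨t, by rw [ha]⟩
  have haocc : a ∈ done.filter (fun x => pvCellAt grid x == p) := by rw [hocc]; simp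
  have hadone : a ∈ done := List.mem_of_mem_filter haocc
  have hap : pvCellAt grid a = p := by
    have := List.of_mem_filter haocc; exact eq_of_beq this
  have hane : a ≠ c := fun h => hcd (h ▸ hadone)
  have hfilter' : (done ++ [c]).filter (fun x => pvCellAt grid x == p) =
      done.filter (fun x => pvCellAt grid x == p) ++ [c] := by
    rw [List.filter_append]
    simp [hpdef]
  by_cases hx : x = a
  · subst hx
    unfold pvVal
    simp only [hap, hp, if_true]
    have hmem : x ∈ done ++ [c] := by simp [hadone]
    rw [if_pos hmem, hfilter', hocc]
    have hlast : (x :: t ++ [c]).getLastD (0, 0) = c := by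
      rw [show x :: t ++ [c] = (x :: t) ++ [c] by simp]
      exact List.getLastD_concat
    have hlen : ¬ (x :: t ++ [c]).length < 2 := by
      simp only [List.length_append, List.length_cons]; omega
    rw [if_neg hlen]
    have hg : (x :: (t ++ [c])).getLast? = some c := by
      rw [show x :: (t ++ [c]) = (x :: t) ++ [c] by simp]
      exact List.getLast?_concat
    simp [hg]
  · rw [if_neg hx]
    by_cases hxc : x = c
    · subst hxc
      unfold pvVal
      simp only [← hpdef, hp, if_true]
      have hmem : x ∈ done ++ [x] := by simp
      rw [if_pos hmem, hfilter', hocc]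
      have hlen : ¬ (a :: t ++ [x]).length < 2 := by
        simp only [List.length_append, List.length_cons]; omega
      rw [if_neg hlen]
      have hhead : (a :: t ++ [x]).headD (0, 0) = a := rfl
      rw [hhead, if_neg (fun h => hx h.symm)]
    · -- untouched cell
      rw [if_neg hxc]
      unfold pvVal
      by_cases hq : pyStrIslower (pvCellAt grid x) = true
      swap
      · simp only [if_neg hq]
      simp only [hq, if_true]
      by_cases hxdone : x ∈ done
      swap
      · have hmem : ¬ x ∈ done ++ [c] := by simp [hxdone, hxc]
        rw [if_neg hmem, if_neg hxdone]
      have hmem : x ∈ done ++ [c] := by simp [hxdone]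
      rw [if_pos hmem, if_pos hxdone]
      by_cases hqp : pvCellAt grid x = p
      · -- same character, x strictly between: all linked to the head a
        rw [hqp, hfilter', hocc]
        have hxocc : x ∈ done.filter (fun y => pvCellAt grid y == p) := by
          rw [List.mem_filter]; exact ⟨hxdone, by simp [hqp]⟩
        have hxt : x ∈ t := by
          rw [hocc] at hxocc; simp at hxocc
          rcases hxocc with h | h
          · exact absurd h hx
          · exact h
        have htne : t ≠ [] := List.ne_nil_of_mem hxt
        have htpos : 0 < t.length := List.length_pos_iff.mpr htne
        have hlen2 : ¬ (a :: t).length < 2 := by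
          simp only [List.length_cons]; omega
        have hlen2' : ¬ (a :: t ++ [c]).length < 2 := by
          simp only [List.length_append, List.length_cons]; omega
        rw [if_neg hlen2, if_neg hlen2']
        have h1 : (a :: t ++ [c]).headD (0, 0) = a := rfl
        have h2 : (a :: t).headD (0, 0) = a := rfl
        rw [h1, h2, if_neg (fun h => hx h.symm), if_neg (fun h => hx h.symm)]
      · -- different character: filter unchanged
        have hfc : ¬ (pvCellAt grid c == pvCellAt grid x) = true := by
          intro h; exact hqp (eq_of_beq h).symm
        rw [List.filter_append]
        simp [hfc]

-- the double write of A's else-branch turns mkGrid done into mkGrid (done ++ [c])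
lemma pvStep_match (grid : List (List String)) (n m : Nat) (done : List (Nat × Nat))
    (c a : Nat × Nat)
    (hc : c ∈ pvCells n m) (hcd : c ∉ done) (hsub : ∀ x ∈ done, x ∈ pvCells n m)
    (hp : pyStrIslower (pvCellAt grid c) = true)
    (ha : (done.filter (fun x => pvCellAt grid x == pvCellAt grid c)).head? = some a) :
    pvSet2 (pvSet2 (pvMkGrid grid n m done) c.1 c.2 ((a.1 : Int), (a.2 : Int)))
        a.1 a.2 ((c.1 : Int), (c.2 : Int)) =
      pvMkGrid grid n m (done ++ [c]) := by
  have haocc : a ∈ done.filter (fun x => pvCellAt grid x == pvCellAt grid c) := by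
    cases h : done.filter (fun x => pvCellAt grid x == pvCellAt grid c) with
    | nil => rw [h] at ha; simp at ha
    | cons b t => rw [h] at ha; simp at ha; simp [ha]
  have hadone : a ∈ done := List.mem_of_mem_filter haocc
  have hacell : a ∈ pvCells n m := hsub a hadone
  have hc1 := (pvMem_cells.mp hc).1
  have hc2 := (pvMem_cells.mp hc).2
  have ha1 := (pvMem_cells.mp hacell).1
  have ha2 := (pvMem_cells.mp hacell).2
  have hane : a ≠ c := fun h => hcd (h ▸ hadone)
  rw [pvMkGrid_eq_map, pvSet2_mapGrid (fun i j => pvVal grid done (i, j)) hc1 hc2,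
    pvSet2_mapGrid _ ha1 ha2, pvMkGrid_eq_map]
  apply List.map_congr_left
  intro i hi
  apply List.map_congr_left
  intro j hj
  rw [List.mem_range] at hi hj
  rw [pvVal_snoc_match grid done c a hp hcd ha (i, j)]
  by_cases h1 : (i, j) = a
  · have : i = a.1 ∧ j = a.2 := by rw [← h1]; exact ⟨rfl, rfl⟩
    simp [this]
  · have : ¬ (i = a.1 ∧ j = a.2) := by
      intro ⟨u, v⟩; exact h1 (Prod.ext u v)
    rw [if_neg this, if_neg h1]
    by_cases h2 : (i, j) = c
    · have : i = c.1 ∧ j = c.2 := by rw [← h2]; exact ⟨rfl, rfl⟩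
      simp [this]
    · have : ¬ (i = c.1 ∧ j = c.2) := by
        intro ⟨u, v⟩; exact h2 (Prod.ext u v)
      rw [if_neg this, if_neg h2]

lemma pvInit_eq_mkGrid (grid : List (List String)) (n m : Nat) :
    List.replicate n (List.replicate m ((-1 : Int), (-1 : Int))) = pvMkGrid grid n m [] := by
  apply List.ext_getElem
  · simp [pvMkGrid]
  · intro i h1 h2
    simp only [List.getElem_replicate, pvMkGrid, List.getElem_map, List.getElem_range]
    apply List.ext_getElem
    · simp
    · intro j h3 h4
      simp [pvVal]

-- the matcher invariant
def pvMInv (grid : List (List String)) (matcher : PySem.Dict String (Nat × Nat))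
    (done : List (Nat × Nat)) : Prop :=
  ∀ p, pyStrIslower p = true →
    matcher.get? p = (done.filter (fun x => pvCellAt grid x == p)).head?

lemma pvFold_inv (grid : List (List String)) (n m : Nat) :
    ∀ (rest done : List (Nat × Nat)) (pg : List (List (Int × Int)))
      (matcher : PySem.Dict String (Nat × Nat)),
      pvCells n m = done ++ rest →
      pg = pvMkGrid grid n m done →
      pvMInv grid matcher done →
      (rest.foldl (pvStepA grid) (pg, matcher)).1 = pvMkGrid grid n m (pvCells n m) := by
  intro rest
  induction rest with
  | nil =>
    intro done pg matcher hsplit hpg _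
    simp only [List.foldl_nil]
    rw [hpg, hsplit, List.append_nil]
  | cons c rest ih =>
    intro done pg matcher hsplit hpg hminv
    have hnodup : (done ++ c :: rest).Nodup := by rw [← hsplit]; exact pvCells_nodup n m
    have hcd : c ∉ done := by
      intro h
      exact (List.disjoint_of_nodup_append hnodup) h (by simp)
    have hc : c ∈ pvCells n m := by rw [hsplit]; simp
    have hsub : ∀ x ∈ done, x ∈ pvCells n m := by
      intro x hx; rw [hsplit]; simp [hx]
    have hsplit' : pvCells n m = (done ++ [c]) ++ rest := by
      rw [hsplit]; simp
    simp only [List.foldl_cons]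
    by_cases hp : pyStrIslower (pvCellAt grid c) = true
    · cases hga : matcher.get? (pvCellAt grid c) with
      | none =>
        have hstep : pvStepA grid (pg, matcher) c = (pg, matcher.insert (pvCellAt grid c) c) := by
          simp [pvStepA, hp, hga]
        rw [hstep]
        have hnone : done.filter (fun x => pvCellAt grid x == pvCellAt grid c) = [] := by
          have := hminv (pvCellAt grid c) hp
          rw [hga] at this
          cases h : done.filter (fun x => pvCellAt grid x == pvCellAt grid c) with
          | nil => rfl
          | cons b t => rw [h] at this; simp at this
        apply ih (done ++ [c]) _ _ hsplit'
        · rw [hpg]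
          exact (pvMkGrid_congr grid n m _ _ (pvVal_snoc_insert grid done c hp hcd hnone)).symm
        · intro q hq
          by_cases hqp : q = pvCellAt grid c
          · subst hqp
            rw [PySem.Dict.get?_insert_self, List.filter_append, hnone, List.nil_append]
            simp
          · rw [PySem.Dict.get?_insert, if_neg hqp, hminv q hq, List.filter_append]
            have hfc : ¬ (pvCellAt grid c == q) = true := by
              intro h; exact hqp (eq_of_beq h).symm
            simp [hfc]
      | some a =>
        have hstep : pvStepA grid (pg, matcher) c =
            (pvSet2 (pvSet2 pg c.1 c.2 ((a.1 : Int), (a.2 : Int))) a.1 a.2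
              ((c.1 : Int), (c.2 : Int)), matcher) := by
          simp [pvStepA, hp, hga]
        rw [hstep]
        have ha : (done.filter (fun x => pvCellAt grid x == pvCellAt grid c)).head? = some a := by
          rw [← hminv (pvCellAt grid c) hp, hga]
        apply ih (done ++ [c]) _ _ hsplit'
        · rw [hpg]
          exact pvStep_match grid n m done c a hc hcd hsub hp ha
        · intro q hq
          rw [hminv q hq, List.filter_append]
          by_cases hqp : q = pvCellAt grid c
          · subst hqp
            obtain ⟨t, hocc⟩ : ∃ t,
                done.filter (fun x => pvCellAt grid x == pvCellAt grid c) = a :: t := by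
              cases h : done.filter (fun x => pvCellAt grid x == pvCellAt grid c) with
              | nil => rw [h] at ha; simp at ha
              | cons b t => rw [h] at ha; simp at ha; exact ⟨t, by rw [ha]⟩
            rw [hocc]; rfl
          · have hfc : ¬ (pvCellAt grid c == q) = true := by
              intro h; exact hqp (eq_of_beq h).symm
            simp [hfc]
    · have hstep : pvStepA grid (pg, matcher) c = (pg, matcher) := by
        simp [pvStepA, hp]
      rw [hstep]
      apply ih (done ++ [c]) _ _ hsplit'
      · rw [hpg]
        exact (pvMkGrid_congr grid n m _ _ (pvVal_snoc_skip grid done c hp)).symm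
      · intro q hq
        rw [hminv q hq, List.filter_append]
        have hfc : ¬ (pvCellAt grid c == q) = true := by
          intro h
          exact hp ((eq_of_beq h) ▸ hq)
        simp [hfc]

lemma pvA_eq_mkGrid (grid : List (List String)) :
    generate_portal_grid grid =
      pvMkGrid grid grid.length (grid.headD []).length
        (pvCells grid.length (grid.headD []).length) := by
  unfold generate_portal_grid
  have hflat : ((List.range grid.length).foldl
      (fun st i => (List.range (grid.headD []).length).foldl
        (fun st j => pvStepA grid st (i, j)) st)
      (List.replicate grid.length
        (List.replicate (grid.headD []).length ((-1 : Int), (-1 : Int))), PySem.Dict.empty)) =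
      ((pvCells grid.length (grid.headD []).length).foldl (pvStepA grid)
        (List.replicate grid.length
          (List.replicate (grid.headD []).length ((-1 : Int), (-1 : Int))), PySem.Dict.empty)) := by
    rw [pvCells, pvFoldl_flatMap]
    simp only [List.foldl_map]
  simp only [hflat]
  apply pvFold_inv grid grid.length (grid.headD []).length _ [] _ _ (by simp)
  · exact pvInit_eq_mkGrid grid _ _
  · intro q hq
    simp [PySem.Dict.get?_empty]

-- the occurrence dict built by B's first pass holds exactly the row-major filter
lemma pvOccFold_eq_filter (grid : List (List String)) (l : List (Nat × Nat))
    (d : PySem.Dict String (List (Nat × Nat))) :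
    l.foldl
      (fun d c => if pyStrIslower (pvCellAt grid c) then
        d.modify (pvCellAt grid c) [] (· ++ [c]) else d) d =
    (l.filter (fun c => pyStrIslower (pvCellAt grid c))).foldl
      (fun d c => d.modify (pvCellAt grid c) [] (· ++ [c])) d := by
  induction l generalizing d with
  | nil => rfl
  | cons c l ih =>
    by_cases hp : pyStrIslower (pvCellAt grid c) = true
    · simp only [List.foldl_cons, List.filter_cons, hp, List.foldl_cons, ih]
      simp
    · simp only [List.foldl_cons, List.filter_cons, hp, ih]
      simp

lemma pvOcc_getD (grid : List (List String)) (l : List (Nat × Nat)) (p : String)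
    (hp : pyStrIslower p = true) :
    ((l.foldl
      (fun d c => if pyStrIslower (pvCellAt grid c) then
        d.modify (pvCellAt grid c) [] (· ++ [c]) else d) PySem.Dict.empty).getD p []) =
    l.filter (fun c => pvCellAt grid c == p) := by
  rw [pvOccFold_eq_filter]
  have hmap : (l.filter (fun c => pyStrIslower (pvCellAt grid c))).foldl
      (fun d c => d.modify (pvCellAt grid c) [] (· ++ [c])) PySem.Dict.empty =
    ((l.filter (fun c => pyStrIslower (pvCellAt grid c))).map
        (fun c => (pvCellAt grid c, c))).foldl
      (fun d q => d.modify q.1 [] (· ++ [q.2])) PySem.Dict.empty := by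
    rw [List.foldl_map]
  rw [hmap, PySem.Dict.getD_foldl_modify_append, PySem.Dict.getD_empty, List.nil_append,
    List.filter_map, List.map_map]
  have hfun : ((fun q => q.1 == p) ∘ (fun c => (pvCellAt grid c, c))) =
      fun c => pvCellAt grid c == p := rfl
  rw [hfun, List.filter_filter]
  have hpred : (fun c => pvCellAt grid c == p && pyStrIslower (pvCellAt grid c)) =
      fun c => pvCellAt grid c == p := by
    funext c
    by_cases h : (pvCellAt grid c == p) = true
    · rw [h, eq_of_beq h, hp]; rfl
    · simp [h]
  rw [hpred]
  have hid : ((·.2) ∘ fun c => (pvCellAt grid c, c)) = id := rfl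
  rw [hid, List.map_id]

lemma pvB_eq_mkGrid (grid : List (List String)) :
    generate_portal_grid_alt grid =
      pvMkGrid grid grid.length (grid.headD []).length
        (pvCells grid.length (grid.headD []).length) := by
  unfold generate_portal_grid_alt pvMkGrid
  have hflat : ((List.range grid.length).foldl
      (fun d i => (List.range (grid.headD []).length).foldl
        (fun d j =>
          if pyStrIslower (pvCellAt grid (i, j)) then
            d.modify (pvCellAt grid (i, j)) [] (· ++ [(i, j)]) else d) d)
      (PySem.Dict.empty : PySem.Dict String (List (Nat × Nat)))) =
      ((pvCells grid.length (grid.headD []).length).foldl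
        (fun d c => if pyStrIslower (pvCellAt grid c) then
          d.modify (pvCellAt grid c) [] (· ++ [c]) else d) PySem.Dict.empty) := by
    rw [pvCells, pvFoldl_flatMap]
    simp only [List.foldl_map]
  simp only [hflat]
  apply List.map_congr_left
  intro i hi
  apply List.map_congr_left
  intro j hj
  rw [List.mem_range] at hi hj
  have hmem : (i, j) ∈ pvCells grid.length (grid.headD []).length :=
    pvMem_cells.mpr ⟨hi, hj⟩
  by_cases hp : pyStrIslower (pvCellAt grid (i, j)) = true
  · have hocc := pvOcc_getD grid (pvCells grid.length (grid.headD []).length)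
      (pvCellAt grid (i, j)) hp
    simp only [pvVal, hocc, hp, if_pos hmem, if_true]
  · simp only [pvVal, hp, if_false, Bool.false_eq_true]

-- ===== VERDICT (by name: the statement is the Claim_ definition above) =====
theorem generate_portal_grid_spec : Claim_equal_generate_portal_grid := by
  intro grid _ _
  unfold Spec_generate_portal_grid
  rw [pvA_eq_mkGrid, pvB_eq_mkGrid]
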